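-- pv_equiv track=rewrite | github.com/maesuajoe92/SINBIP_performance_dashboard | app/sparkline.py | _build_month_labels
-- ===== SOURCE A (Python) =====
-- from typing import Dict, List
--
-- def _build_month_labels(month_cols: List[str]) -> Dict[str, str]:
--     """
--     Sheet22 has repeated month names (MAR, APR, ... MAR.1, APR.1, ...)
--     Build stable labels that preserve column order and disambiguate duplicates.
--     Example: MAR -> MAR, APR -> APR, ... MAR.1 -> MAR_2
--     """
--     labels: Dict[str, str] = {}
--     seen: Dict[str, int] = {}
--     for col in month_cols:
--         base = str(col).replace(".", "_").strip()
--         count = seen.get(base, 0) + 1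
--         seen[base] = count
--         labels[col] = f"{base}_{count}" if count > 1 else base
--     return labels
-- ===== SOURCE B (Python) =====
-- from typing import Dict, List
--
-- def _build_month_labels(month_cols: List[str]) -> Dict[str, str]:
--     # Group-by decomposition: first build an index table base -> positions,
--     # then label each group by enumeration, then assemble the dict in column order.
--     bases = [str(c).replace(".", "_").strip() for c in month_cols]
--     groups: Dict[str, List[int]] = {}
--     for i, b in enumerate(bases):
--         groups.setdefault(b, []).append(i)
--     out: List[str] = [None] * len(month_cols)
--     for b, idxs in groups.items():
--         for k, i in enumerate(idxs, start=1):
--             out[i] = b if k == 1 else f"{b}_{k}"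
--     return {col: lab for col, lab in zip(month_cols, out)}
-- ===== Notes on version B (the rewrite author's own statement) =====
-- stated objective: alternative
-- what changed: Replaces A's single interleaved pass with a running per-base counter dict by a group-by pipeline: build an index table base -> list of positions, label each group by enumerating it (1,2,...), scatter the labels into a position array, then assemble the dict in column order.
import Mathlib
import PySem

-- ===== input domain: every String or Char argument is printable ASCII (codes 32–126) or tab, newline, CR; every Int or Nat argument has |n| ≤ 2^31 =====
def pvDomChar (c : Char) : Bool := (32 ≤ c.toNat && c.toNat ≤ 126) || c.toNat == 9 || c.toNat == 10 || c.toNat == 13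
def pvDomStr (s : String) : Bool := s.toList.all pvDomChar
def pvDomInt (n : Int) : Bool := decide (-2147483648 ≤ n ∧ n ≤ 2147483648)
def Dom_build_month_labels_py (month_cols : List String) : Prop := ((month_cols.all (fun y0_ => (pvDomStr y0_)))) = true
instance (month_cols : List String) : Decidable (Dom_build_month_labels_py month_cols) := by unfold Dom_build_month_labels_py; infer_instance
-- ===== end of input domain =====

-- B replaces A's single interleaved pass with a running per-base counter dict by a
-- group-by pipeline (index table base -> positions, per-group enumeration, scatter,
-- rebuild in column order); return-value equivalence.

-- ===== PORT A =====
-- port of: labels = {}; seen = {}; for col: base = col.replace('.','_').strip();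
--          count = seen.get(base,0)+1; seen[base] = count; labels[col] = f"{base}_{count}" if count>1 else base
def build_month_labels_py (month_cols : List String) : List (String × String) :=
  (month_cols.foldl
    (fun (st : PySem.Dict String String × PySem.Dict String Int) col =>
      let base := PySem.Str.strip (PySem.Str.replace col "." "_")
      let count := st.2.getD base 0 + 1
      (st.1.insert col (if count > 1 then base ++ "_" ++ PySem.Int.toStr count else base),
       st.2.insert base count))
    (PySem.Dict.empty, PySem.Dict.empty)).1.items

-- ===== PORT B =====
-- Python 'out[i] = v': exact for 0 ≤ i < len(out) (every write here has such an i,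
-- an enumerate index of a position list)
def pvSetAt (xs : List (Option String)) (i : Int) (v : String) : List (Option String) :=
  xs.set i.toNat (some v)

-- port of Source B: bases = [...]; groups.setdefault(b, []).append(i) (= d[b] = d.get(b, []) + [i]);
--   out = [None]*n; for b, idxs in groups.items(): for k, i in enumerate(idxs, 1): out[i] = ...;
--   return {col: lab for col, lab in zip(month_cols, out)}   (out[i] is always a written string,
--   so the str-typed read is realized by .getD "")
def build_month_labels_py_alt (month_cols : List String) : List (String × String) :=
  let bases := month_cols.map (fun c => PySem.Str.strip (PySem.Str.replace c "." "_"))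
  let groups : PySem.Dict String (List Int) :=
    (PySem.List.enumerate bases 0).foldl
      (fun d p => d.modify p.2 [] (fun l => l ++ [p.1])) PySem.Dict.empty
  let out : List (Option String) :=
    groups.items.foldl
      (fun out g =>
        (PySem.List.enumerate g.2 1).foldl
          (fun out p => pvSetAt out p.2 (if p.1 = 1 then g.1 else g.1 ++ "_" ++ PySem.Int.toStr p.1))
          out)
      (List.replicate month_cols.length none)
  ((month_cols.zip out).foldl
    (fun (labels : PySem.Dict String String) p => labels.insert p.1 (p.2.getD ""))
    PySem.Dict.empty).items

-- ===== PRECONDITION & SPEC =====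
def Spec_build_month_labels_py (month_cols : List String) (out : List (String × String)) : Prop := out = build_month_labels_py_alt month_cols
instance (month_cols : List String) (out : List (String × String)) : Decidable (Spec_build_month_labels_py month_cols out) := by unfold Spec_build_month_labels_py; infer_instance

-- ===== CLAIM (what is proved, stated in full; the proofs are below) =====
def Claim_equal_build_month_labels_py : Prop := ∀ (month_cols : List String), Dom_build_month_labels_py month_cols → Spec_build_month_labels_py month_cols (build_month_labels_py month_cols)

-- ===== LEMMAS AND PROOFS =====

-- the shared normalization of a column name
def pvNorm (c : String) : String := PySem.Str.strip (PySem.Str.replace c "." "_")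

-- the label of position i, expressed by a prefix count (the common reference point)
def pvLblF (bases : List String) (i : Nat) : String :=
  if (bases.take (i + 1)).count (bases.getD i "") = 1 then bases.getD i ""
  else bases.getD i "" ++ "_" ++ PySem.Int.toStr (((bases.take (i + 1)).count (bases.getD i "")) : Int)

-- B's inner (per-group) scatter loop, named for the proofs (defeq to the port's lambda body)
def pvInner (b : String) (idxs : List Int) (out : List (Option String)) : List (Option String) :=
  (PySem.List.enumerate idxs 1).foldl
    (fun out p => pvSetAt out p.2 (if p.1 = 1 then b else b ++ "_" ++ PySem.Int.toStr p.1)) out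

-- the positions of base b, in order
-- the scatter step, named (defeq to the port's lambda)
def pvStep (b : String) (out : List (Option String)) (p : Int × Int) : List (Option String) :=
  pvSetAt out p.2 (if p.1 = 1 then b else b ++ "_" ++ PySem.Int.toStr p.1)

def pvGrp (bases : List String) (b : String) : List Int :=
  (((PySem.List.enumerate bases 0).map Prod.swap).filter (fun q => q.1 == b)).map (fun q => q.2)

theorem pv_A_chars (rest pre : List String) (L : PySem.Dict String String)
    (S : PySem.Dict String Int)
    (hS : ∀ b, S.getD b 0 = ((pre.map pvNorm).count b : Int)) :
    (rest.foldl
      (fun (st : PySem.Dict String String × PySem.Dict String Int) col =>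
        let base := pvNorm col
        let count := st.2.getD base 0 + 1
        (st.1.insert col (if count > 1 then base ++ "_" ++ PySem.Int.toStr count else base),
         st.2.insert base count))
      (L, S)).1
    = (rest.zip ((List.range rest.length).map
          (fun j => pvLblF ((pre ++ rest).map pvNorm) (pre.length + j)))).foldl
        (fun d p => d.insert p.1 p.2) L := by
  induction rest generalizing pre L S with
  | nil => simp
  | cons col t ih =>
    rw [List.foldl_cons, List.length_cons, List.range_succ_eq_map, List.map_cons, List.map_map,
      List.zip_cons_cons, List.foldl_cons]
    have hbase : ((pre ++ col :: t).map pvNorm).getD pre.length "" = pvNorm col := by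
      simp [List.map_append, List.getD]
    have htake : (pre.map pvNorm ++ pvNorm col :: t.map pvNorm).take (pre.length + 1)
        = pre.map pvNorm ++ [pvNorm col] := by
      have h := List.take_length_add_append (l₁ := pre.map pvNorm)
        (l₂ := pvNorm col :: t.map pvNorm) 1
      simpa using h
    have hcnt : (((pre ++ col :: t).map pvNorm).take (pre.length + 1)).count (pvNorm col)
        = (pre.map pvNorm).count (pvNorm col) + 1 := by
      rw [List.map_append, List.map_cons, htake]
      simp [List.count_append]
    have hlbl : (if S.getD (pvNorm col) 0 + 1 > 1 then
          pvNorm col ++ "_" ++ PySem.Int.toStr (S.getD (pvNorm col) 0 + 1) else pvNorm col)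
        = pvLblF ((pre ++ col :: t).map pvNorm) (pre.length + 0) := by
      unfold pvLblF
      rw [Nat.add_zero, hbase, hcnt, hS]
      by_cases h0 : (pre.map pvNorm).count (pvNorm col) = 0
      · rw [h0]; norm_num
      · rw [if_pos (by omega), if_neg (by omega)]
        norm_cast
    rw [← hlbl]
    have hS' : ∀ b, ((S.insert (pvNorm col) (S.getD (pvNorm col) 0 + 1)).getD b 0)
        = ((((pre ++ [col]).map pvNorm)).count b : Int) := by
      intro b
      rw [PySem.Dict.getD_insert]
      by_cases hb : b = pvNorm col
      · subst hb
        rw [if_pos rfl, hS]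
        simp [List.count_append]
      · rw [if_neg hb, hS]
        simp [List.count_append, Ne.symm hb]
    have h := ih (pre ++ [col])
      (L.insert col (if S.getD (pvNorm col) 0 + 1 > 1 then
        pvNorm col ++ "_" ++ PySem.Int.toStr (S.getD (pvNorm col) 0 + 1) else pvNorm col))
      (S.insert (pvNorm col) (S.getD (pvNorm col) 0 + 1)) hS'
    rw [h]
    congr 2
    apply List.map_congr_left
    intro j hj
    have hb' : pre ++ [col] ++ t = pre ++ col :: t := by simp
    rw [hb']
    simp only [Function.comp_apply]
    congr 1
    simp
    omega

theorem pv_inner_eq (b : String) (idxs : List Int) (out : List (Option String)) :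
    pvInner b idxs out = (PySem.List.enumerate idxs 1).foldl (pvStep b) out := rfl

theorem pv_len (b : String) (idxs : List Int) (s : Int) (out : List (Option String)) :
    ((PySem.List.enumerate idxs s).foldl (pvStep b) out).length = out.length := by
  induction idxs generalizing s out with
  | nil => simp [PySem.List.enumerate]
  | cons x t ih =>
    rw [PySem.List.enumerate_cons, List.foldl_cons, ih]
    simp [pvStep, pvSetAt]

theorem pv_skip (b : String) (idxs : List Int) (s : Int) (out : List (Option String))
    (i : Nat) (h : ∀ j ∈ idxs, j.toNat ≠ i) :
    ((PySem.List.enumerate idxs s).foldl (pvStep b) out)[i]? = out[i]? := by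
  induction idxs generalizing s out with
  | nil => simp [PySem.List.enumerate]
  | cons x t ih =>
    rw [PySem.List.enumerate_cons, List.foldl_cons,
      ih (s + 1) _ (fun j hj => h j (List.mem_cons_of_mem _ hj))]
    exact List.getElem?_set_ne (h x (List.mem_cons_self))

theorem pv_hit (b : String) (pre post : List Int) (i : Nat) (s : Int)
    (out : List (Option String)) (hpost : ∀ j ∈ post, j.toNat ≠ i) (hi : i < out.length) :
    ((PySem.List.enumerate (pre ++ (i : Int) :: post) s).foldl (pvStep b) out)[i]? =
      some (some (if s + (pre.length : Int) = 1 then b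
        else b ++ "_" ++ PySem.Int.toStr (s + pre.length))) := by
  rw [PySem.List.enumerate_append, List.foldl_append, PySem.List.enumerate_cons, List.foldl_cons,
    pv_skip _ _ _ _ _ hpost]
  show (pvSetAt _ (i : Int) _)[i]? = _
  unfold pvSetAt
  rw [Int.toNat_natCast, List.getElem?_set_self (by rw [pv_len]; exact hi)]

theorem pv_grp_mem (bases : List String) (b : String) (j : Int) (h : j ∈ pvGrp bases b) :
    ∃ k : Nat, ∃ _ : k < bases.length, j = (k : Int) ∧ bases[k] = b := by
  unfold pvGrp at h
  simp only [List.mem_map, List.mem_filter] at h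
  obtain ⟨q, ⟨hq, hb⟩, rfl⟩ := h
  obtain ⟨p, hp, rfl⟩ := hq
  rw [PySem.List.mem_enumerate_iff] at hp
  obtain ⟨k, hk, rfl⟩ := hp
  refine ⟨k, hk, by simp, ?_⟩
  simpa [Prod.swap] using hb

theorem pv_grp_length (xs : List String) (b : String) : (pvGrp xs b).length = xs.count b := by
  unfold pvGrp
  rw [List.length_map, ← List.countP_eq_length_filter, List.countP_map]
  rw [show ((fun (q : String × Int) => q.1 == b) ∘ Prod.swap)
      = ((fun x => x == b) ∘ (fun (e : Int × String) => e.2)) from rfl]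
  rw [← List.countP_map, PySem.List.map_snd_enumerate]
  rfl

theorem pv_grp_split (bases : List String) (b : String) (i : Nat) (h : i < bases.length)
    (hb : bases[i] = b) :
    pvGrp bases b = pvGrp (bases.take i) b ++ (i : Int) ::
      (((PySem.List.enumerate (bases.drop (i + 1)) ((i : Int) + 1)).map Prod.swap).filter
        (fun q => q.1 == b)).map (fun q => q.2) := by
  unfold pvGrp
  conv_lhs => rw [← List.take_append_drop i bases, ← List.getElem_cons_drop h]
  rw [PySem.List.enumerate_append, PySem.List.enumerate_cons, List.map_append, List.map_cons,
    List.filter_append, List.map_append, List.filter_cons]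
  simp [hb, List.length_take, min_eq_left h.le]

theorem pv_inner_get (bases : List String) (b : String) (out : List (Option String))
    (hout : out.length = bases.length) (i : Nat) (h : i < bases.length) :
    (pvInner b (pvGrp bases b) out)[i]? =
      if bases[i] = b then some (some (pvLblF bases i)) else out[i]? := by
  rw [pv_inner_eq]
  by_cases hb : bases[i] = b
  · rw [if_pos hb, pv_grp_split bases b i h hb, pv_hit]
    · congr 1
      unfold pvLblF
      have hgd : bases.getD i "" = b := by rw [List.getD_eq_getElem _ _ h, hb]
      have hcnt : (bases.take (i + 1)).count b = (bases.take i).count b + 1 := by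
        rw [List.take_add_one]
        have : bases[i]? = some b := by rw [List.getElem?_eq_getElem h, hb]
        simp [this, List.count_append]
      rw [hgd, hcnt, pv_grp_length]
      rw [show (1 : Int) + ((bases.take i).count b : Int)
          = (((bases.take i).count b + 1 : Nat) : Int) from by push_cast; ring]
      simp
    · intro j hj
      simp only [List.mem_map, List.mem_filter] at hj
      obtain ⟨q, ⟨hq, _⟩, rfl⟩ := hj
      obtain ⟨p, hp, rfl⟩ := hq
      rw [PySem.List.mem_enumerate_iff] at hp
      obtain ⟨k, hk, rfl⟩ := hp
      simp only [Prod.swap_prod_mk]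
      omega
    · omega
  · rw [if_neg hb]
    apply pv_skip
    intro j hj
    obtain ⟨k, hk, rfl, hbk⟩ := pv_grp_mem bases b j hj
    intro he
    have hki : i = k := by omega
    subst hki
    exact hb hbk

theorem pv_outer (bases : List String) (S : List String) (out : List (Option String))
    (hout : out.length = bases.length) :
    (S.foldl (fun o b => pvInner b (pvGrp bases b) o) out).length = bases.length ∧
    ∀ i (h : i < bases.length),
      (S.foldl (fun o b => pvInner b (pvGrp bases b) o) out)[i]? =
        if bases[i] ∈ S then some (some (pvLblF bases i)) else out[i]? := by
  induction S generalizing out with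
  | nil => exact ⟨hout, fun i h => by simp⟩
  | cons c S ih =>
    have hlen1 : (pvInner c (pvGrp bases c) out).length = bases.length := by
      rw [pv_inner_eq, pv_len, hout]
    obtain ⟨hl, hg⟩ := ih (pvInner c (pvGrp bases c) out) hlen1
    refine ⟨by simpa using hl, ?_⟩
    intro i h
    rw [List.foldl_cons, hg i h, pv_inner_get bases c out hout i h]
    by_cases h1 : bases[i] ∈ c :: S
    · rw [if_pos h1]
      rcases List.mem_cons.mp h1 with hc | hS
      · by_cases h2 : bases[i] ∈ S
        · rw [if_pos h2]
        · rw [if_neg h2, if_pos hc]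
      · rw [if_pos hS]
    · have hc : ¬(bases[i] = c) := fun e => h1 (List.mem_cons.mpr (Or.inl e))
      have hS : ¬(bases[i] ∈ S) := fun e => h1 (List.mem_cons.mpr (Or.inr e))
      rw [if_neg h1, if_neg hS, if_neg hc]

theorem pv_zip_some (cols : List String) (lbls : List String) (d : PySem.Dict String String) :
    (cols.zip (lbls.map some)).foldl (fun d p => d.insert p.1 (p.2.getD "")) d
      = (cols.zip lbls).foldl (fun d p => d.insert p.1 p.2) d := by
  induction cols generalizing lbls d with
  | nil => simp
  | cons c t ih =>
    cases lbls with
    | nil => simp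
    | cons l ls => simp only [List.map_cons, List.zip_cons_cons, List.foldl_cons, Option.getD_some]; exact ih ls _

theorem pv_B_chars (cols : List String) :
    build_month_labels_py_alt cols
      = ((cols.zip ((List.range cols.length).map (fun j => pvLblF (cols.map pvNorm) j))).foldl
          (fun d p => d.insert p.1 p.2) PySem.Dict.empty).items := by
  simp only [build_month_labels_py_alt]
  rw [show (fun c => PySem.Str.strip (PySem.Str.replace c "." "_")) = pvNorm from rfl]
  have hW : (PySem.List.enumerate (cols.map pvNorm) 0).foldl
        (fun d p => d.modify p.2 [] (fun l => l ++ [p.1])) PySem.Dict.empty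
      = ((PySem.List.enumerate (cols.map pvNorm) 0).map Prod.swap).foldl
        (fun d q => d.modify q.1 [] (fun l => l ++ [q.2])) PySem.Dict.empty := by
    rw [List.foldl_map]
    rfl
  rw [hW]
  have hkeys : (((PySem.List.enumerate (cols.map pvNorm) 0).map Prod.swap).foldl
        (fun d q => d.modify q.1 [] (fun l => l ++ [q.2])) PySem.Dict.empty).keys
      = PySem.Set.ofList (cols.map pvNorm) := by
    rw [PySem.Dict.keys_foldl_modify_key _ Prod.fst [] (fun _ q => fun l => l ++ [q.2])]
    rw [List.map_map, show (Prod.fst ∘ (Prod.swap : Int × String → String × Int))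
        = (fun e => e.2) from rfl, PySem.List.map_snd_enumerate]
    rfl
  have hnodup : (((PySem.List.enumerate (cols.map pvNorm) 0).map Prod.swap).foldl
        (fun d q => d.modify q.1 [] (fun l => l ++ [q.2])) PySem.Dict.empty).keys.Nodup := by
    exact PySem.Dict.nodup_keys_foldl_modify_key _ Prod.fst [] (fun _ q => fun l => l ++ [q.2])
      PySem.Dict.empty (by simp [PySem.Dict.keys_empty])
  have hgetD : ∀ b, (((PySem.List.enumerate (cols.map pvNorm) 0).map Prod.swap).foldl
        (fun d q => d.modify q.1 [] (fun l => l ++ [q.2])) PySem.Dict.empty).getD b []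
      = pvGrp (cols.map pvNorm) b := by
    intro b
    rw [PySem.Dict.getD_foldl_modify_append]
    simp [PySem.Dict.getD_empty, pvGrp]
  have hitems : (((PySem.List.enumerate (cols.map pvNorm) 0).map Prod.swap).foldl
        (fun d q => d.modify q.1 [] (fun l => l ++ [q.2])) PySem.Dict.empty).items
      = (PySem.Set.ofList (cols.map pvNorm)).map (fun b => (b, pvGrp (cols.map pvNorm) b)) := by
    rw [PySem.Dict.items_eq_map_keys _ hnodup [], hkeys]
    apply List.map_congr_left
    intro b _
    rw [hgetD]
  rw [hitems, List.foldl_map]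
  have hscat : ((PySem.Set.ofList (cols.map pvNorm)).foldl
        (fun (out : List (Option String)) b =>
          (PySem.List.enumerate (pvGrp (cols.map pvNorm) b) 1).foldl
            (fun out p => pvSetAt out p.2
              (if p.1 = 1 then b else b ++ "_" ++ PySem.Int.toStr p.1)) out)
        (List.replicate cols.length none))
      = (PySem.Set.ofList (cols.map pvNorm)).foldl
          (fun o b => pvInner b (pvGrp (cols.map pvNorm) b) o)
          (List.replicate cols.length none) := rfl
  rw [hscat]
  obtain ⟨hl, hg⟩ := pv_outer (cols.map pvNorm) (PySem.Set.ofList (cols.map pvNorm))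
    (List.replicate cols.length none) (by simp)
  have hfin : (PySem.Set.ofList (cols.map pvNorm)).foldl
        (fun o b => pvInner b (pvGrp (cols.map pvNorm) b) o)
        (List.replicate cols.length none)
      = (List.range cols.length).map (fun j => some (pvLblF (cols.map pvNorm) j)) := by
    apply List.ext_getElem?
    intro i
    by_cases hi : i < cols.length
    · have hi' : i < (cols.map pvNorm).length := by simpa using hi
      rw [hg i hi']
      rw [if_pos ((PySem.Set.mem_ofList _ _).mpr (List.getElem_mem hi'))]
      rw [List.getElem?_map, List.getElem?_range hi]
      rfl
    · rw [List.getElem?_eq_none (by rw [hl]; simpa using Nat.le_of_not_lt hi),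
        List.getElem?_eq_none (by simpa using Nat.le_of_not_lt hi)]
  rw [hfin, show (List.range cols.length).map (fun j => some (pvLblF (cols.map pvNorm) j))
      = ((List.range cols.length).map (fun j => pvLblF (cols.map pvNorm) j)).map some from by
        rw [List.map_map]; rfl,
    pv_zip_some]

-- ===== VERDICT (by name: the statement is the Claim_ definition above) =====
theorem build_month_labels_py_spec : Claim_equal_build_month_labels_py := by
  intro month_cols _
  unfold Spec_build_month_labels_py
  rw [pv_B_chars]
  unfold build_month_labels_py
  have h := pv_A_chars month_cols [] PySem.Dict.empty PySem.Dict.empty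
    (by intro b; simp [PySem.Dict.getD_empty])
  simp only [List.nil_append, List.length_nil, Nat.zero_add] at h
  rw [show (fun (st : PySem.Dict String String × PySem.Dict String Int) col =>
      let base := PySem.Str.strip (PySem.Str.replace col "." "_")
      let count := st.2.getD base 0 + 1
      (st.1.insert col (if count > 1 then base ++ "_" ++ PySem.Int.toStr count else base),
       st.2.insert base count))
    = (fun (st : PySem.Dict String String × PySem.Dict String Int) col =>
      let base := pvNorm col
      let count := st.2.getD base 0 + 1
      (st.1.insert col (if count > 1 then base ++ "_" ++ PySem.Int.toStr count else base),
       st.2.insert base count)) from rfl]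
  rw [h]
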